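-- pv_equiv track=rewrite | github.com/iamplus-trimabk/figma-to-code | templates/scripts/component_generator.py | _get_component_category
-- ===== SOURCE A (Python) =====
-- from typing import Dict, Any, List
--
-- def _get_component_category(component_config: Dict) -> str:
--     """Determine component category based on Stage 2 interface"""
--     name = component_config.get('name', '')
--     description = component_config.get('description', '').lower()
--
--     # Navigation components
--     if name in ['Button', 'ForgotPassword'] or 'button' in description:
--         return 'navigation'
--
--     # Form components
--     elif name in ['Email', 'Password', 'Search', 'Check'] or any(x in description for x in ['input', 'form', 'field']):
--         return 'forms'
--
--     # Feedback components
--     elif 'alert' in description or 'notification' in description or 'feedback' in description: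
--         return 'feedback'
--
--     # Display components (default)
--     else:
--         return 'display'
-- ===== SOURCE B (Python) =====
-- _PRIORITY = {'navigation': 0, 'forms': 1, 'feedback': 2, 'display': 3}
-- _NAME_CAT = {'Button': 'navigation', 'ForgotPassword': 'navigation',
--              'Email': 'forms', 'Password': 'forms', 'Search': 'forms', 'Check': 'forms'}
-- _KEYWORD_CAT = {'button': 'navigation', 'input': 'forms', 'form': 'forms', 'field': 'forms',
--                 'alert': 'feedback', 'notification': 'feedback', 'feedback': 'feedback'}
--
-- def _get_component_category(component_config):
--     """Determine component category: classify name and description independently,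
--     then merge the two verdicts by taking the higher-priority category."""
--     description = component_config.get('description', '').lower()
--     best = _NAME_CAT.get(component_config.get('name', ''), 'display')
--     for kw, cat in _KEYWORD_CAT.items():
--         if kw in description and _PRIORITY[cat] < _PRIORITY[best]:
--             best = cat
--     return best
-- ===== Notes on version B (the rewrite author's own statement) =====
-- stated objective: alternative
-- what changed: Instead of A's priority-ordered if/elif cascade over combined name-or-keyword tests, B classifies the name by one dict lookup and the description by a best-so-far fold over a keyword->category map, then merges the two independent verdicts by a numeric priority table.
import Mathlib
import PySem

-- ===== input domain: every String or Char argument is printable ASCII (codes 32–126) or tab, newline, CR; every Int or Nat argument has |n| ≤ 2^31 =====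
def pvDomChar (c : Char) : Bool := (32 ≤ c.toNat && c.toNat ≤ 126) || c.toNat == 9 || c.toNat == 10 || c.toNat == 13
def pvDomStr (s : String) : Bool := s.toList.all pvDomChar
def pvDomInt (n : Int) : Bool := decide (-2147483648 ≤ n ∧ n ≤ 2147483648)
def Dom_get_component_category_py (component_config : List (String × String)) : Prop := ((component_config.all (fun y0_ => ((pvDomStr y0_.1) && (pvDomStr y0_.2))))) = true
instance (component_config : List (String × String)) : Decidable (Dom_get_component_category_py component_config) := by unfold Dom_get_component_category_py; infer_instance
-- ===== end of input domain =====

-- B replaces A's priority-ordered if/elif cascade by two independent classifications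
-- (name via a dict lookup, description via a best-so-far fold over a keyword→category map)
-- merged by a numeric priority table; same results, alternative decomposition.

-- ===== PORT A =====
def get_component_category_py (component_config : List (String × String)) : String :=
  let name := (PySem.Dict.mk component_config).getD "name" ""
  let description := PySem.Str.lower ((PySem.Dict.mk component_config).getD "description" "")
  if ["Button", "ForgotPassword"].contains name || PySem.Str.isIn "button" description then
    "navigation"
  else if ["Email", "Password", "Search", "Check"].contains name
      || ["input", "form", "field"].any (fun x => PySem.Str.isIn x description) then
    "forms"
  else if PySem.Str.isIn "alert" description || PySem.Str.isIn "notification" description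
      || PySem.Str.isIn "feedback" description then
    "feedback"
  else
    "display"

-- ===== PORT B =====
def pvPriority (c : String) : Nat :=
  (PySem.Dict.mk [("navigation", 0), ("forms", 1), ("feedback", 2), ("display", 3)]).getD c 4

def pvNameCat : List (String × String) :=
  [("Button", "navigation"), ("ForgotPassword", "navigation"),
   ("Email", "forms"), ("Password", "forms"), ("Search", "forms"), ("Check", "forms")]

def pvKeywordCat : List (String × String) :=
  [("button", "navigation"), ("input", "forms"), ("form", "forms"), ("field", "forms"),
   ("alert", "feedback"), ("notification", "feedback"), ("feedback", "feedback")]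

-- loop body of B's for-loop: keep the higher-priority (smaller number) category
def pvStep (description best : String) (kv : String × String) : String :=
  if PySem.Str.isIn kv.1 description && decide (pvPriority kv.2 < pvPriority best) then kv.2
  else best

def get_component_category_py_alt (component_config : List (String × String)) : String :=
  let description := PySem.Str.lower ((PySem.Dict.mk component_config).getD "description" "")
  let base := (PySem.Dict.mk pvNameCat).getD ((PySem.Dict.mk component_config).getD "name" "") "display"
  pvKeywordCat.foldl (pvStep description) base

-- ===== PRECONDITION & SPEC =====
def Spec_get_component_category_py (component_config : List (String × String)) (out : String) : Prop := out = get_component_category_py_alt component_config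
instance (component_config : List (String × String)) (out : String) : Decidable (Spec_get_component_category_py component_config out) := by unfold Spec_get_component_category_py; infer_instance

-- ===== CLAIM (what is proved, stated in full; the proofs are below) =====
def Claim_equal_get_component_category_py : Prop := ∀ (component_config : List (String × String)), Dom_get_component_category_py component_config → Spec_get_component_category_py component_config (get_component_category_py component_config)

-- ===== LEMMAS AND PROOFS =====
theorem pvBeqComm {α : Type} [BEq α] [LawfulBEq α] (a b : α) : (a == b) = (b == a) := by
  by_cases h : a = b
  · subst h; rfl
  · simp [h, Ne.symm h]

theorem pvPri_nav : pvPriority "navigation" = 0 := rfl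
theorem pvPri_forms : pvPriority "forms" = 1 := rfl
theorem pvPri_fb : pvPriority "feedback" = 2 := rfl
theorem pvPri_disp : pvPriority "display" = 3 := rfl

theorem pvStep_lt (d k c b : String) (h : pvPriority c < pvPriority b) :
    pvStep d b (k, c) = if PySem.Str.isIn k d then c else b := by
  simp [pvStep, h]

theorem pvStep_ge (d k c b : String) (h : ¬ pvPriority c < pvPriority b) :
    pvStep d b (k, c) = b := by
  simp [pvStep, h]

-- "navigation" has priority 0, so no keyword can ever replace it
theorem pvLnav (d : String) (l : List (String × String)) :
    l.foldl (pvStep d) "navigation" = "navigation" := by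
  induction l with
  | nil => rfl
  | cons kv t ih =>
    have : pvStep d "navigation" kv = "navigation" :=
      pvStep_ge d kv.1 kv.2 "navigation" (by simp [pvPri_nav])
    simpa [this] using ih

theorem pvLforms (d : String) :
    pvKeywordCat.foldl (pvStep d) "forms" =
      if PySem.Str.isIn "button" d then "navigation" else "forms" := by
  cases h : PySem.Str.isIn "button" d <;>
  · simp at h
    simp [pvKeywordCat, pvStep_lt, pvStep_ge, pvPri_nav, pvPri_forms, pvPri_fb, pvPri_disp,
      h, pvLnav]

theorem pvLdisp (d : String) :
    pvKeywordCat.foldl (pvStep d) "display" =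
      if PySem.Str.isIn "button" d then "navigation"
      else if PySem.Str.isIn "input" d || (PySem.Str.isIn "form" d || PySem.Str.isIn "field" d) then "forms"
      else if PySem.Str.isIn "alert" d || (PySem.Str.isIn "notification" d || PySem.Str.isIn "feedback" d) then "feedback"
      else "display" := by
  cases h1 : PySem.Str.isIn "button" d <;>
  cases h2 : PySem.Str.isIn "input" d <;>
  cases h3 : PySem.Str.isIn "form" d <;>
  cases h4 : PySem.Str.isIn "field" d <;>
  cases h5 : PySem.Str.isIn "alert" d <;>
  cases h6 : PySem.Str.isIn "notification" d <;>
  cases h7 : PySem.Str.isIn "feedback" d <;>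
  · simp at h1 h2 h3 h4 h5 h6 h7
    simp [pvKeywordCat, pvStep_lt, pvStep_ge, pvPri_nav, pvPri_forms, pvPri_fb, pvPri_disp,
      pvLnav, h1, h2, h3, h4, h5, h6, h7]

-- ===== VERDICT (by name: the statement is the Claim_ definition above) =====
set_option maxHeartbeats 2000000 in
theorem get_component_category_py_spec : Claim_equal_get_component_category_py := by
  intro cc _
  unfold Spec_get_component_category_py get_component_category_py get_component_category_py_alt
  set n := (PySem.Dict.mk cc).getD "name" "" with hn
  set d := PySem.Str.lower ((PySem.Dict.mk cc).getD "description" "") with hd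
  clear_value n d
  clear hn hd
  simp only [List.contains_cons, List.contains_nil, Bool.or_false, List.any_cons, List.any_nil,
    pvBeqComm n, pvNameCat, PySem.Dict.getD, PySem.Dict.get?, List.find?]
  cases h1 : ("Button" == n) <;> cases h2 : ("ForgotPassword" == n) <;>
  cases h3 : ("Email" == n) <;> cases h4 : ("Password" == n) <;>
  cases h5 : ("Search" == n) <;> cases h6 : ("Check" == n) <;>
    simp [h1, h2, h3, h4, h5, h6, pvLnav, pvLforms, pvLdisp, or_assoc]
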